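-- pv_equiv track=rewrite | github.com/junyeong-nero/ps | leetcode/greedy/2499.py | minimumTotalCost
-- ===== SOURCE A (Python) =====
-- from collections import Counter
--
-- def minimumTotalCost(A, B):
--     n = len(A)
--
--     # Step 1: Collect indices where A[i] == B[i]
--     conflict_indices = {
--         i for i in range(n)
--         if A[i] == B[i]
--     }
--
--     # If no conflicts, no cost required
--     if not conflict_indices:
--         return 0
--
--     # Step 2: Count values at conflict positions
--     value_count = Counter(A[i] for i in conflict_indices)
--
--     # Find the dominant value among conflicts
--     dominant_value = max(value_count, key=value_count.get)
--
--     # Step 3: Determine how many extra indices are required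
--     dominant_freq = value_count[dominant_value]
--     required_extra = max(2 * dominant_freq - len(conflict_indices), 0)
--
--     # Step 4: Add valid indices to break dominance
--     for i in range(n):
--         if required_extra == 0:
--             break
--
--         if (
--             i not in conflict_indices and
--             A[i] != dominant_value and
--             B[i] != dominant_value
--         ):
--             conflict_indices.add(i)
--             required_extra -= 1
--
--     # Step 5: If still unmet requirement, impossible
--     if required_extra > 0:
--         return -1
--
--     return sum(conflict_indices)
-- ===== SOURCE B (Python) =====
-- def _vote(cand, vote, a):
--     # Boyer-Moore majority-vote step
--     if vote == 0:
--         return a, 1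
--     if a == cand:
--         return cand, vote + 1
--     return cand, vote - 1
--
--
-- def minimumTotalCost(A, B):
--     # One pass: sum of conflict indices, conflict count, majority vote over
--     # the values at conflict positions.
--     total = 0
--     cnt = 0
--     cand = None
--     vote = 0
--     for i, (a, b) in enumerate(zip(A, B)):
--         if a == b:
--             total += i
--             cnt += 1
--             cand, vote = _vote(cand, vote, a)
--     if cnt == 0:
--         return 0
--     freq = sum(1 for a, b in zip(A, B) if a == b and a == cand)
--     need = max(2 * freq - cnt, 0)
--     for i, (a, b) in enumerate(zip(A, B)):
--         if need == 0:
--             break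
--         if a != b and a != cand and b != cand:
--             total += i
--             need -= 1
--     if need > 0:
--         return -1
--     return total
-- ===== Notes on version B (the rewrite author's own statement) =====
-- stated objective: alternative
-- what changed: Replaces A's conflict-index set, Counter and max-by-count with a single streaming pass that sums conflict indices while running Boyer-Moore majority voting over the conflict values, then counts only the candidate's frequency.
import Mathlib
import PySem

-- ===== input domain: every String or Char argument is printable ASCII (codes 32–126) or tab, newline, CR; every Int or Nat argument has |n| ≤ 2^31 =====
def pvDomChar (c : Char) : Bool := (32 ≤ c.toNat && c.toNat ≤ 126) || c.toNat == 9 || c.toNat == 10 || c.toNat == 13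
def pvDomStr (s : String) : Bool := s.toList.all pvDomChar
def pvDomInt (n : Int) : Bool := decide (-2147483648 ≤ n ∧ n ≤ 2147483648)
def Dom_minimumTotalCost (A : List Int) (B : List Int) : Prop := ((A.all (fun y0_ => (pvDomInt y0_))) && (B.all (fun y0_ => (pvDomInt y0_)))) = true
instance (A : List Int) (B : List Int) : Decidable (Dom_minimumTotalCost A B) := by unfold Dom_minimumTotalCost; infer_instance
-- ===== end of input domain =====

-- B replaces A's set / Counter / max machinery by a single streaming pass with Boyer–Moore
-- majority voting over the values at conflict positions (objective: alternative).
-- ===== PORT A =====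
def minimumTotalCost (A : List Int) (B : List Int) : Int :=
  let n : Int := A.length
  let conflict : PySem.Set Int :=
    (PySem.List.pyRange 0 n 1).foldl
      (fun s i =>
        if PySem.List.pyGetD A i 0 = PySem.List.pyGetD B i 1 then PySem.Set.add s i else s)
      PySem.Set.empty
  if conflict = [] then 0
  else
    let value_count : PySem.Dict Int Int :=
      PySem.Dict.counter (conflict.map (fun i => PySem.List.pyGetD A i 0))
    match PySem.List.max? value_count.keys (fun k => value_count.getD k 0) with
    | none => 0  -- unreachable: value_count has a key for every conflict index
    | some dominant =>
      let dominant_freq := value_count.getD dominant 0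
      let required : Int := max (2 * dominant_freq - (conflict.length : Int)) 0
      let st := (PySem.List.pyRange 0 n 1).foldl
        (fun (st : PySem.Set Int × Int) i =>
          if st.2 = 0 then st
          else if ¬ PySem.Set.contains st.1 i ∧ PySem.List.pyGetD A i 0 ≠ dominant ∧
                    PySem.List.pyGetD B i 1 ≠ dominant
          then (PySem.Set.add st.1 i, st.2 - 1) else st)
        (conflict, required)
      if st.2 > 0 then -1
      else st.1.foldl (· + ·) 0

-- ===== PORT B =====
-- Boyer–Moore majority-vote step (Source B's _vote)
def voteStep (cand : Option Int) (vote : Int) (a : Int) : Option Int × Int :=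
  if vote = 0 then (some a, 1)
  else if some a = cand then (cand, vote + 1)
  else (cand, vote - 1)

def minimumTotalCost_alt (A : List Int) (B : List Int) : Int :=
  let st := (PySem.List.enumerate (A.zip B) 0).foldl
    (fun (st : Int × Int × Option Int × Int) p =>
      if p.2.1 = p.2.2 then
        (st.1 + p.1, st.2.1 + 1, voteStep st.2.2.1 st.2.2.2 p.2.1)
      else st)
    (0, 0, none, 0)
  let total := st.1
  let cnt := st.2.1
  let cand := st.2.2.1
  if cnt = 0 then 0
  else
    let freq : Int := (A.zip B).foldl
      (fun acc p => if p.1 = p.2 ∧ some p.1 = cand then acc + 1 else acc) 0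
    let need : Int := max (2 * freq - cnt) 0
    let st2 := (PySem.List.enumerate (A.zip B) 0).foldl
      (fun (st : Int × Int) p =>
        if st.2 = 0 then st
        else if p.2.1 ≠ p.2.2 ∧ some p.2.1 ≠ cand ∧ some p.2.2 ≠ cand
        then (st.1 + p.1, st.2 - 1) else st)
      (total, need)
    if st2.2 > 0 then -1 else st2.1

-- ===== PRECONDITION & SPEC =====
-- Pre_ excludes exactly the inputs where Python A raises IndexError (B shorter than A).
def Pre_minimumTotalCost (A : List Int) (B : List Int) : Prop := A.length ≤ B.length
instance (A : List Int) (B : List Int) : Decidable (Pre_minimumTotalCost A B) := by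
  unfold Pre_minimumTotalCost; infer_instance
def pvWitness_minimumTotalCost : List Int × List Int := ([1, 2, 5], [1, 3, 5])

def Spec_minimumTotalCost (A : List Int) (B : List Int) (out : Int) : Prop :=
  out = minimumTotalCost_alt A B
instance (A : List Int) (B : List Int) (out : Int) : Decidable (Spec_minimumTotalCost A B out) := by
  unfold Spec_minimumTotalCost; infer_instance

-- ===== CLAIM (what is proved, stated in full; the proofs are below) =====
def Claim_equal_minimumTotalCost : Prop := ∀ (A : List Int) (B : List Int),
  Dom_minimumTotalCost A B → Pre_minimumTotalCost A B →
  Spec_minimumTotalCost A B (minimumTotalCost A B)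

-- ===== LEMMAS AND PROOFS =====

-- The common view of both programs: (index, A[i], B[i]) triples.
def pvT (A B : List Int) : List (Int × Int × Int) :=
  (PySem.List.pyRange 0 (A.length : Int) 1).map
    (fun j => (j, PySem.List.pyGetD A j 0, PySem.List.pyGetD B j 1))

def pvC (A B : List Int) : List (Int × Int × Int) :=
  (pvT A B).filter (fun p => decide (p.2.1 = p.2.2))

def bmRun (l : List Int) : Option Int × Int :=
  l.foldl (fun s a => voteStep s.1 s.2 a) (none, 0)

lemma enum_eq (A B : List Int) (h : A.length ≤ B.length) :
    PySem.List.enumerate (A.zip B) 0 = pvT A B := by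
  have hlen : (A.zip B).length = A.length := by
    rw [List.length_zip]; omega
  rw [PySem.List.enumerate_eq_map_pyRange (A.zip B) ((0 : Int), (1 : Int))]
  unfold pvT
  simp only [PySem.List.len_eq]
  rw [hlen]
  apply List.map_congr_left
  intro j hj
  rw [PySem.List.mem_pyRange_one] at hj
  obtain ⟨hj0, hjlt⟩ := hj
  have hjA : j < (A.length : Int) := hjlt
  have hjB : j < (B.length : Int) := by omega
  have hjz : j < ((A.zip B).length : Int) := by rw [hlen]; exact hjA
  rw [PySem.List.pyGetD_eq_getElem _ _ hj0 hjz,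
      PySem.List.pyGetD_eq_getElem _ _ hj0 hjA,
      PySem.List.pyGetD_eq_getElem _ _ hj0 hjB]
  simp [List.getElem_zip]

def pvIdx (A B : List Int) : List Int := (pvC A B).map (·.1)
def pvVals (A B : List Int) : List Int := (pvC A B).map (·.2.1)

lemma pvC_rep (A B : List Int) : pvC A B =
    ((PySem.List.pyRange 0 (A.length : Int) 1).filter
      (fun j => decide (PySem.List.pyGetD A j 0 = PySem.List.pyGetD B j 1))).map
      (fun j => (j, PySem.List.pyGetD A j 0, PySem.List.pyGetD B j 1)) := by
  unfold pvC pvT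
  rw [List.filter_map]
  rfl

lemma pvIdx_rep (A B : List Int) : pvIdx A B =
    (PySem.List.pyRange 0 (A.length : Int) 1).filter
      (fun j => decide (PySem.List.pyGetD A j 0 = PySem.List.pyGetD B j 1)) := by
  unfold pvIdx
  rw [pvC_rep, List.map_map]
  exact List.map_id _

-- A's conflict-set loop builds exactly the conflict index list
lemma conflictA_eq (A B : List Int) :
    (PySem.List.pyRange 0 (A.length : Int) 1).foldl
      (fun s i =>
        if PySem.List.pyGetD A i 0 = PySem.List.pyGetD B i 1 then PySem.Set.add s i else s)
      PySem.Set.empty = pvIdx A B := by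
  rw [pvIdx_rep]
  rw [PySem.List.foldl_ite_eq_foldl_filter
        (p := fun i => PySem.List.pyGetD A i 0 = PySem.List.pyGetD B i 1)
        (f := fun s i => PySem.Set.add s i)]
  rw [show (PySem.Set.empty : PySem.Set Int) = [] from rfl]
  rw [show (fun (s : PySem.Set Int) (i : Int) => PySem.Set.add s i) = PySem.Set.add from rfl]
  rw [← PySem.Set.ofList_eq_foldl]
  exact PySem.Set.ofList_eq_self_of_nodup _
    (List.Nodup.filter _ (PySem.List.nodup_pyRange_one 0 _))

lemma pvVals_eq (A B : List Int) :
    (pvIdx A B).map (fun i => PySem.List.pyGetD A i 0) = pvVals A B := by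
  rw [pvIdx_rep]
  unfold pvVals
  rw [pvC_rep, List.map_map]
  rfl

lemma pvT_map_fst (A B : List Int) :
    (pvT A B).map (·.1) = PySem.List.pyRange 0 (A.length : Int) 1 := by
  unfold pvT
  rw [List.map_map]
  exact List.map_id _

lemma pvT_mem_iff (A B : List Int) :
    ∀ p ∈ pvT A B, p.1 ∈ pvIdx A B ↔ p.2.1 = p.2.2 := by
  intro p hp
  unfold pvT at hp
  rw [List.mem_map] at hp
  obtain ⟨j, hj, rfl⟩ := hp
  rw [pvIdx_rep, List.mem_filter]
  simp [hj]

lemma bm_inv (l : List Int) :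
    0 ≤ (bmRun l).2 ∧
    (∀ x : Int, some x ≠ (bmRun l).1 → 2 * (l.count x : Int) ≤ (l.length : Int) - (bmRun l).2) ∧
    (∀ x : Int, some x = (bmRun l).1 → 2 * (l.count x : Int) ≤ (l.length : Int) + (bmRun l).2) := by
  induction l using List.reverseRecOn with
  | nil => simp [bmRun]
  | append_singleton l a ih =>
    obtain ⟨hv, h1, h2⟩ := ih
    have hrw : bmRun (l ++ [a]) = voteStep (bmRun l).1 (bmRun l).2 a := by
      unfold bmRun; rw [List.foldl_append]; rfl
    rcases hcv : bmRun l with ⟨c, v⟩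
    rw [hcv] at hrw hv h1 h2
    dsimp only at hv h1 h2
    -- generic bound: any value's count is ≤ (len + v)/2 resp (len - v)/2
    have hany : ∀ x : Int, 2 * (l.count x : Int) ≤ (l.length : Int) + v := by
      intro x
      by_cases hxc : some x = c
      · exact h2 x hxc
      · have := h1 x hxc; omega
    rw [hrw]; unfold voteStep
    simp only [List.count_append, List.count_cons, List.count_nil, List.length_append,
      List.length_singleton, beq_iff_eq]
    by_cases h0 : v = 0
    · subst h0
      rw [if_pos rfl]
      refine ⟨by norm_num, ?_, ?_⟩
      · intro x hx
        dsimp only at hx ⊢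
        have hxa : ¬ (x = a) := fun h => hx (by rw [h])
        have hb := hany x
        simp only [Ne.symm hxa, if_false]
        push_cast; omega
      · intro x hx
        dsimp only at hx ⊢
        have hxa : x = a := Option.some.inj hx
        have hb := hany x
        simp only [hxa]
        rw [← hxa]
        push_cast; omega
    · rw [if_neg h0]
      by_cases hac : some a = c
      · rw [if_pos hac]
        refine ⟨by omega, ?_, ?_⟩
        · intro x hx
          dsimp only at hx ⊢
          have hxa : ¬ (x = a) := fun h => hx (h ▸ hac)
          have := h1 x hx
          simp only [Ne.symm hxa, if_false]
          push_cast; omega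
        · intro x hx
          dsimp only at hx ⊢
          have := h2 x hx
          have hxa : x = a := Option.some.inj (hx.trans hac.symm)
          simp only [hxa]
          rw [← hxa]
          push_cast; omega
      · rw [if_neg hac]
        refine ⟨by omega, ?_, ?_⟩
        · intro x hx
          dsimp only at hx ⊢
          have := h1 x hx
          by_cases hxa : x = a
          · simp only [hxa]; rw [← hxa]; push_cast; omega
          · simp only [Ne.symm hxa, if_false]; push_cast; omega
        · intro x hx
          dsimp only at hx ⊢
          have := h2 x hx
          have hxa : ¬ (x = a) := fun h => hac (h ▸ hx : some a = c)
          simp only [Ne.symm hxa, if_false]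
          push_cast; omega

lemma bm_majority (l : List Int) (x : Int) (h : 2 * (l.count x : Int) > (l.length : Int)) :
    (bmRun l).1 = some x := by
  obtain ⟨hv, h1, _⟩ := bm_inv l
  by_contra hne
  have := h1 x (fun hh => hne hh.symm)
  omega

lemma bm_aux : ∀ (l : List Int) (c v : Int),
    ∃ y, (l.foldl (fun s a => voteStep s.1 s.2 a) (some c, v)).1 = some y ∧ (y = c ∨ y ∈ l) := by
  intro l
  induction l with
  | nil => exact fun c v => ⟨c, rfl, Or.inl rfl⟩
  | cons a l ih =>
    intro c v
    simp only [List.foldl_cons]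
    unfold voteStep
    by_cases h0 : v = 0
    · rw [if_pos h0]
      obtain ⟨y, hy, hyl⟩ := ih a 1
      exact ⟨y, hy, Or.inr (by rcases hyl with h | h <;> simp [h])⟩
    · rw [if_neg h0]
      by_cases hac : some a = (some c : Option Int)
      · rw [if_pos hac]
        obtain ⟨y, hy, hyl⟩ := ih c (v + 1)
        refine ⟨y, hy, ?_⟩
        rcases hyl with h | h
        exacts [Or.inl h, Or.inr (List.mem_cons_of_mem _ h)]
      · rw [if_neg hac]
        obtain ⟨y, hy, hyl⟩ := ih c (v - 1)
        refine ⟨y, hy, ?_⟩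
        rcases hyl with h | h
        exacts [Or.inl h, Or.inr (List.mem_cons_of_mem _ h)]

lemma bm_cand_mem (l : List Int) (h : l ≠ []) : ∃ y ∈ l, (bmRun l).1 = some y := by
  match l with
  | [] => exact absurd rfl h
  | a :: l =>
    have hstep : bmRun (a :: l) = l.foldl (fun s a => voteStep s.1 s.2 a) (some a, 1) := by
      unfold bmRun
      simp [voteStep]
    obtain ⟨y, hy, hyl⟩ := bm_aux l a 1
    refine ⟨y, ?_, by rw [hstep]; exact hy⟩
    rcases hyl with hh | hh
    · simp [hh]
    · exact List.mem_cons_of_mem _ hh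

-- r = 0 freezes both second loops
lemma loopA_zero (l : List (Int × Int × Int)) (s : PySem.Set Int) (d : Int) :
    l.foldl (fun (st : PySem.Set Int × Int) p =>
      if st.2 = 0 then st
      else if ¬ PySem.Set.contains st.1 p.1 ∧ p.2.1 ≠ d ∧ p.2.2 ≠ d
      then (PySem.Set.add st.1 p.1, st.2 - 1) else st) (s, 0) = (s, 0) := by
  induction l with
  | nil => rfl
  | cons p l ih => simpa using ih

lemma loopB_zero (l : List (Int × Int × Int)) (t : Int) (c : Option Int) :
    l.foldl (fun (st : Int × Int) p =>
      if st.2 = 0 then st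
      else if p.2.1 ≠ p.2.2 ∧ some p.2.1 ≠ c ∧ some p.2.2 ≠ c
      then (st.1 + p.1, st.2 - 1) else st) (t, 0) = (t, 0) := by
  induction l with
  | nil => rfl
  | cons p l ih => simpa using ih

-- coupled invariant of the two second loops
lemma loop_eq (d : Int) : ∀ (l : List (Int × Int × Int)) (s : List Int) (t r : Int),
    (l.map (·.1)).Nodup →
    (∀ p ∈ l, p.1 ∈ s ↔ p.2.1 = p.2.2) →
    s.sum = t →
    (l.foldl (fun (st : PySem.Set Int × Int) p =>
        if st.2 = 0 then st
        else if ¬ PySem.Set.contains st.1 p.1 ∧ p.2.1 ≠ d ∧ p.2.2 ≠ d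
        then (PySem.Set.add st.1 p.1, st.2 - 1) else st) (s, r)).2 =
      (l.foldl (fun (st : Int × Int) p =>
        if st.2 = 0 then st
        else if p.2.1 ≠ p.2.2 ∧ some p.2.1 ≠ some d ∧ some p.2.2 ≠ some d
        then (st.1 + p.1, st.2 - 1) else st) (t, r)).2 ∧
    (l.foldl (fun (st : PySem.Set Int × Int) p =>
        if st.2 = 0 then st
        else if ¬ PySem.Set.contains st.1 p.1 ∧ p.2.1 ≠ d ∧ p.2.2 ≠ d
        then (PySem.Set.add st.1 p.1, st.2 - 1) else st) (s, r)).1.sum =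
      (l.foldl (fun (st : Int × Int) p =>
        if st.2 = 0 then st
        else if p.2.1 ≠ p.2.2 ∧ some p.2.1 ≠ some d ∧ some p.2.2 ≠ some d
        then (st.1 + p.1, st.2 - 1) else st) (t, r)).1 := by
  intro l
  induction l with
  | nil => intro s t r _ _ hsum; exact ⟨rfl, hsum⟩
  | cons p l ih =>
    intro s t r hnd hmem hsum
    have hnd' : (l.map (·.1)).Nodup := (by simpa using hnd : _ ∧ _).2
    have hpnotin : p.1 ∉ l.map (·.1) := (by simpa using hnd : _ ∧ _).1
    simp only [List.foldl_cons]
    by_cases hr : r = 0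
    · subst hr
      simp only [reduceIte]
      exact ih s t 0 hnd' (fun q hq => hmem q (List.mem_cons_of_mem _ hq)) hsum
    · rw [if_neg hr, if_neg hr]
      by_cases hcond : p.2.1 ≠ p.2.2 ∧ p.2.1 ≠ d ∧ p.2.2 ≠ d
      · obtain ⟨h1, h2, h3⟩ := hcond
        have hns : p.1 ∉ s := fun h => h1 ((hmem p (List.mem_cons_self ..)).1 h)
        rw [if_pos (⟨by simp [hns], h2, h3⟩ :
              ¬ PySem.Set.contains s p.1 ∧ p.2.1 ≠ d ∧ p.2.2 ≠ d),
            if_pos (⟨h1, fun h => h2 (Option.some.inj h), fun h => h3 (Option.some.inj h)⟩ :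
              p.2.1 ≠ p.2.2 ∧ some p.2.1 ≠ some d ∧ some p.2.2 ≠ some d)]
        apply ih _ _ _ hnd' ?_ ?_
        · intro q hq
          have hqp : q.1 ≠ p.1 := fun h => hpnotin (h ▸ List.mem_map_of_mem hq)
          rw [PySem.Set.mem_add]
          simp only [hqp, or_false]
          exact hmem q (List.mem_cons_of_mem _ hq)
        · rw [PySem.Set.add_of_not_mem hns, List.sum_append]
          simp [hsum]
      · -- condition false on both sides
        have hcondA : ¬ (¬ PySem.Set.contains s p.1 ∧ p.2.1 ≠ d ∧ p.2.2 ≠ d) := by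
          rintro ⟨hna, ha2, ha3⟩
          have : p.1 ∉ s := by simpa [PySem.Set.contains_iff] using hna
          exact hcond ⟨fun h => this ((hmem p (List.mem_cons_self ..)).2 h), ha2, ha3⟩
        have hcondB : ¬ (p.2.1 ≠ p.2.2 ∧ some p.2.1 ≠ some d ∧ some p.2.2 ≠ some d) := by
          rintro ⟨hb1, hb2, hb3⟩
          exact hcond ⟨hb1, fun h => hb2 (by rw [h]), fun h => hb3 (by rw [h])⟩
        rw [if_neg hcondA, if_neg hcondB]
        exact ih s t r hnd' (fun q hq => hmem q (List.mem_cons_of_mem _ hq)) hsum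

-- B's first pass over the conflicts, split into its three accumulators
lemma altB1 (A B : List Int) :
    (pvT A B).foldl (fun (st : Int × Int × Option Int × Int) p =>
      if p.2.1 = p.2.2 then (st.1 + p.1, st.2.1 + 1, voteStep st.2.2.1 st.2.2.2 p.2.1) else st)
      (0, 0, none, 0)
    = ((pvIdx A B).sum, ((pvC A B).length : Int), bmRun (pvVals A B)) := by
  rw [PySem.List.foldl_ite_eq_foldl_filter (p := fun p : Int × Int × Int => p.2.1 = p.2.2)
      (f := fun (st : Int × Int × Option Int × Int) p =>
        (st.1 + p.1, st.2.1 + 1, voteStep st.2.2.1 st.2.2.2 p.2.1))]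
  rw [show (pvT A B).filter (fun p => decide (p.2.1 = p.2.2)) = pvC A B from rfl]
  rw [PySem.List.foldl_prod_mk (f := fun (t : Int) (p : Int × Int × Int) => t + p.1)
        (g := fun (s : Int × Option Int × Int) (p : Int × Int × Int) =>
          (s.1 + 1, voteStep s.2.1 s.2.2 p.2.1))]
  rw [PySem.List.foldl_prod_mk (f := fun (c : Int) (_ : Int × Int × Int) => c + 1)
        (g := fun (s : Option Int × Int) (p : Int × Int × Int) => voteStep s.1 s.2 p.2.1)]
  have h1 : List.foldl (fun (t : Int) (p : Int × Int × Int) => t + p.1) 0 (pvC A B)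
      = (pvIdx A B).sum := by
    rw [PySem.List.foldl_add _ (fun p : Int × Int × Int => p.1)]
    simp [pvIdx]
  have h2 : List.foldl (fun (c : Int) (_ : Int × Int × Int) => c + 1) 0 (pvC A B)
      = ((pvC A B).length : Int) := by
    rw [PySem.List.foldl_add _ (fun _ : Int × Int × Int => 1), PySem.List.sum_map_const_int]
    ring
  have h3 : List.foldl (fun (s : Option Int × Int) (p : Int × Int × Int) =>
      voteStep s.1 s.2 p.2.1) (none, 0) (pvC A B) = bmRun (pvVals A B) := by
    unfold bmRun pvVals
    rw [List.foldl_map]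
  rw [h1, h2, h3]

-- B's counting pass counts the candidate among the conflict values
lemma altFreq (A B : List Int) (h : A.length ≤ B.length) (cand : Option Int) :
    (A.zip B).foldl (fun acc p => if p.1 = p.2 ∧ some p.1 = cand then acc + 1 else acc) 0
    = ((pvVals A B).countP (fun a => decide (some a = cand)) : Int) := by
  have hz : A.zip B = (pvT A B).map (·.2) := by
    rw [← enum_eq A B h, PySem.List.map_snd_enumerate]
  rw [hz, List.foldl_map]
  rw [PySem.List.foldl_ite_add_one
      (p := fun p : Int × Int × Int => p.2.1 = p.2.2 ∧ some p.2.1 = cand)]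
  rw [zero_add]
  congr 1
  unfold pvVals pvC
  rw [List.countP_map, List.countP_filter]
  apply List.countP_congr
  intro p _
  simp only [Function.comp]
  by_cases h1 : p.2.1 = p.2.2 <;> by_cases h2 : some p.2.1 = cand <;> simp [h1, h2]

-- A's second loop, re-read over the triples
lemma foldA_loop (A B : List Int) (dom : Int) (init : PySem.Set Int × Int) :
    (PySem.List.pyRange 0 (A.length : Int) 1).foldl
      (fun (st : PySem.Set Int × Int) i =>
        if st.2 = 0 then st
        else if ¬ PySem.Set.contains st.1 i ∧ PySem.List.pyGetD A i 0 ≠ dom ∧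
                  PySem.List.pyGetD B i 1 ≠ dom
        then (PySem.Set.add st.1 i, st.2 - 1) else st) init
    = (pvT A B).foldl
      (fun (st : PySem.Set Int × Int) p =>
        if st.2 = 0 then st
        else if ¬ PySem.Set.contains st.1 p.1 ∧ p.2.1 ≠ dom ∧ p.2.2 ≠ dom
        then (PySem.Set.add st.1 p.1, st.2 - 1) else st) init := by
  unfold pvT
  rw [List.foldl_map]

lemma countP_some_eq (l : List Int) (d : Int) :
    l.countP (fun a => decide (some a = some d)) = l.count d := by
  rw [List.count]
  apply List.countP_congr
  intro a _
  simp

-- ===== VERDICT (by name: the statement is the Claim_ definition above) =====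
theorem minimumTotalCost_spec : Claim_equal_minimumTotalCost := by
  unfold Claim_equal_minimumTotalCost
  intro A B _ hpre
  unfold Pre_minimumTotalCost at hpre
  unfold Spec_minimumTotalCost minimumTotalCost minimumTotalCost_alt
  dsimp only
  rw [enum_eq A B hpre, conflictA_eq A B, altB1 A B]
  dsimp only
  by_cases hC : pvC A B = []
  · simp [hC, pvIdx]
  · have hIdx : pvIdx A B ≠ [] := by simp [pvIdx, hC]
    have hVals : pvVals A B ≠ [] := by simp [pvVals, hC]
    have hlen0 : ((pvC A B).length : Int) ≠ 0 := by
      simp [List.length_eq_zero_iff, hC]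
    rw [if_neg hIdx, if_neg hlen0]
    rw [pvVals_eq A B]
    rcases hmax : PySem.List.max? (PySem.Dict.counter (pvVals A B)).keys
        (fun k => (PySem.Dict.counter (pvVals A B)).getD k 0) with _ | dom
    · rw [PySem.List.max?_eq_none_iff, PySem.Dict.keys_counter] at hmax
      obtain ⟨v, vs, hv⟩ := List.exists_cons_of_ne_nil hVals
      have : v ∈ PySem.Set.ofList (pvVals A B) := by
        rw [PySem.Set.mem_ofList, hv]; exact List.mem_cons_self ..
      rw [hmax] at this
      exact absurd this (List.not_mem_nil)
    · have hdmem : dom ∈ pvVals A B := by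
        have := PySem.List.max?_mem hmax
        rwa [PySem.Dict.keys_counter, PySem.Set.mem_ofList] at this
      have hdmax : ∀ y ∈ pvVals A B,
          ((pvVals A B).count y : Int) ≤ ((pvVals A B).count dom : Int) := by
        intro y hy
        have := PySem.List.max?_isMax hmax y
          (by rw [PySem.Dict.keys_counter, PySem.Set.mem_ofList]; exact hy)
        rwa [PySem.Dict.getD_counter, PySem.Dict.getD_counter] at this
      dsimp only
      rw [PySem.Dict.getD_counter]
      rw [altFreq A B hpre]
      have hclen : (pvVals A B).length = (pvC A B).length := by
        unfold pvVals; exact List.length_map ..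
      have hilen : (pvIdx A B).length = (pvC A B).length := by
        unfold pvIdx; exact List.length_map ..
      rw [hilen]
      by_cases hmaj : ((pvC A B).length : Int) < 2 * ((pvVals A B).count dom : Int)
      · have hcand : (bmRun (pvVals A B)).1 = some dom := by
          apply bm_majority
          rw [hclen]; omega
        rw [hcand, countP_some_eq]
        rw [foldA_loop A B dom]
        obtain ⟨e2, e1⟩ := loop_eq dom (pvT A B) (pvIdx A B) ((pvIdx A B).sum)
          (max (2 * ((pvVals A B).count dom : Int) - ((pvC A B).length : Int)) 0)
          (by rw [pvT_map_fst]; exact PySem.List.nodup_pyRange_one 0 _)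
          (pvT_mem_iff A B) rfl
        rw [e2, ← List.sum_eq_foldl, e1]
      · obtain ⟨y, hy, hcand⟩ := bm_cand_mem (pvVals A B) hVals
        rw [hcand, countP_some_eq]
        have hneed : max (2 * ((pvVals A B).count y : Int) - ((pvC A B).length : Int)) 0 = 0 := by
          have := hdmax y hy
          apply max_eq_right
          omega
        have hreq : max (2 * ((pvVals A B).count dom : Int) - ((pvC A B).length : Int)) 0 = 0 := by
          apply max_eq_right
          omega
        rw [hneed, hreq, foldA_loop A B dom, loopA_zero, loopB_zero]
        norm_num [← List.sum_eq_foldl]
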